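-- pv_equiv track=rewrite | github.com/Ben-tenOever/Pop-Health-grant-teams | scripts/generate_teams.py | pick_pairs
-- ===== SOURCE A (Python) =====
-- import json, re, itertools, sys
--
-- def pick_pairs(ranked, k=5):
--     pairs = []
--     used = set()
--     for a,b in itertools.combinations(ranked, 2):
--         if len(pairs) >= k:
--             break
--         if a.get("id") in used or b.get("id") in used:
--             continue
--         pairs.append((a,b))
--         used.add(a.get("id")); used.add(b.get("id"))
--     return pairs
-- ===== SOURCE B (Python) =====
-- def pick_pairs(ranked, k=5):
--     # single linear pass: buffer one element whose id is unused, pair it with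
--     # the next element whose id is unused
--     pairs = []
--     used = set()
--     buf = None  # dicts in `ranked` are never None, so None marks "no buffered element"
--     for item in ranked:
--         if len(pairs) >= k:
--             break
--         iid = item.get("id")
--         if iid in used:
--             continue
--         if buf is not None:
--             pairs.append((buf, item))
--             used.add(buf.get("id")); used.add(iid)
--             buf = None
--         else:
--             buf = item
--     return pairs
-- ===== Notes on version B (the rewrite author's own statement) =====
-- stated objective: alternative
-- what changed: Replaced the nested scan over itertools.combinations with a single linear pass that buffers one element with an unused id and pairs it with the next such element (valid because the used set only grows, so skipped elements stay skipped); worst-case O(n^2) becomes O(n), but on typical inputs A's early break already makes it near-linear, so no speed is claimed.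
import Mathlib
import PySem

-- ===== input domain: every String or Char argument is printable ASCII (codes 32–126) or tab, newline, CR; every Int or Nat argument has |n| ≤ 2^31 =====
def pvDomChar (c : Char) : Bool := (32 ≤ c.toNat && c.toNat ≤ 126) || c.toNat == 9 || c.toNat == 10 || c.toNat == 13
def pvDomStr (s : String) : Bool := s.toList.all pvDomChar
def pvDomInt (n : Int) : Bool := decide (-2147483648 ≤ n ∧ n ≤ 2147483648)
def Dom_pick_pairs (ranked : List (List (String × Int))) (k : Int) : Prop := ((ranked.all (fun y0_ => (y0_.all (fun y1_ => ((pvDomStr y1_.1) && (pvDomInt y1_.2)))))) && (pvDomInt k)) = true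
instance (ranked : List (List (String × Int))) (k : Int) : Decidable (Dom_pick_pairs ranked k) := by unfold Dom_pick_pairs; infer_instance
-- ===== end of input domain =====

-- B replaces A's greedy over itertools.combinations by one linear pass that buffers a
-- single unused-id element and pairs it with the next one (objective: alternative algorithm).

-- ===== PORT A =====
-- a.get("id")
def pvId (d : List (String × Int)) : Option Int := PySem.Dict.get? (PySem.Dict.mk d) "id"

-- itertools.combinations(ranked, 2), in iteration order
def pvCombos : List (List (String × Int)) → List ((List (String × Int)) × (List (String × Int)))
  | [] => []
  | x :: rest => rest.map (fun y => (x, y)) ++ pvCombos rest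

-- the for-loop of A over the combinations, with break/continue as early return / recursion
def pvLoopA (combos : List ((List (String × Int)) × (List (String × Int)))) (k : Int)
    (pairs : List ((List (String × Int)) × (List (String × Int)))) (used : PySem.Set (Option Int)) :
    List ((List (String × Int)) × (List (String × Int))) :=
  match combos with
  | [] => pairs
  | (a, b) :: rest =>
    if k ≤ (pairs.length : Int) then pairs
    else if used.contains (pvId a) || used.contains (pvId b) then
      pvLoopA rest k pairs used
    else
      pvLoopA rest k (pairs ++ [(a, b)]) ((used.add (pvId a)).add (pvId b))

def pick_pairs (ranked : List (List (String × Int))) (k : Int) :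
    List ((List (String × Int)) × (List (String × Int))) :=
  pvLoopA (pvCombos ranked) k [] PySem.Set.empty

-- ===== PORT B =====
-- B's single pass: buf = the one buffered element (None = no buffer)
def pvLoopB (l : List (List (String × Int))) (k : Int)
    (pairs : List ((List (String × Int)) × (List (String × Int)))) (used : PySem.Set (Option Int))
    (buf : Option (List (String × Int))) :
    List ((List (String × Int)) × (List (String × Int))) :=
  match l with
  | [] => pairs
  | item :: rest =>
    if k ≤ (pairs.length : Int) then pairs
    else
      let iid := pvId item
      if used.contains iid then pvLoopB rest k pairs used buf
      else
        match buf with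
        | some b => pvLoopB rest k (pairs ++ [(b, item)]) ((used.add (pvId b)).add iid) none
        | none => pvLoopB rest k pairs used (some item)

def pick_pairs_alt (ranked : List (List (String × Int))) (k : Int) :
    List ((List (String × Int)) × (List (String × Int))) :=
  pvLoopB ranked k [] PySem.Set.empty none

-- ===== PRECONDITION & SPEC =====
def Spec_pick_pairs (ranked : List (List (String × Int))) (k : Int) (out : List ((List (String × Int)) × (List (String × Int)))) : Prop := out = pick_pairs_alt ranked k
instance (ranked : List (List (String × Int))) (k : Int) (out : List ((List (String × Int)) × (List (String × Int)))) : Decidable (Spec_pick_pairs ranked k out) := by unfold Spec_pick_pairs; infer_instance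

-- ===== CLAIM (what is proved, stated in full; the proofs are below) =====
def Claim_equal_pick_pairs : Prop := ∀ (ranked : List (List (String × Int))) (k : Int), Dom_pick_pairs ranked k → Spec_pick_pairs ranked k (pick_pairs ranked k)

-- ===== LEMMAS AND PROOFS =====

theorem pvLoopA_ge (combos : List ((List (String × Int)) × (List (String × Int)))) (k : Int)
    (pairs : List ((List (String × Int)) × (List (String × Int)))) (used : PySem.Set (Option Int))
    (h : k ≤ (pairs.length : Int)) : pvLoopA combos k pairs used = pairs := by
  cases combos with
  | nil => rfl
  | cons c rest => obtain ⟨a, b⟩ := c; simp [pvLoopA, h]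

theorem pvSet_mem_add_left (s : PySem.Set (Option Int)) (x y : Option Int)
    (h : y ∈ s) : y ∈ s.add x := (PySem.Set.mem_add s x y).mpr (Or.inl h)

theorem pvSet_mem_add_self (s : PySem.Set (Option Int)) (x : Option Int) :
    x ∈ s.add x := (PySem.Set.mem_add s x x).mpr (Or.inr rfl)

-- all pairs (x, y) are skipped when x's id is already used
theorem pvLoopA_skip (x : List (String × Int)) (ys : List (List (String × Int)))
    (l : List ((List (String × Int)) × (List (String × Int)))) (k : Int)
    (pairs : List ((List (String × Int)) × (List (String × Int)))) (used : PySem.Set (Option Int))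
    (hx : pvId x ∈ used) :
    pvLoopA (ys.map (fun y => (x, y)) ++ l) k pairs used = pvLoopA l k pairs used := by
  induction ys with
  | nil => rfl
  | cons y ys ih =>
    by_cases hk : k ≤ (pairs.length : Int)
    · simp [pvLoopA_ge _ _ _ _ hk]
    · simp [pvLoopA, hk, hx, ih]

-- a block of pairs (x, ·) anywhere in the remaining combinations is transparent
-- once x's id is used (the used set only grows)
theorem pvLoopA_del (l1 : List ((List (String × Int)) × (List (String × Int))))
    (x : List (String × Int)) (ys : List (List (String × Int)))
    (l2 : List ((List (String × Int)) × (List (String × Int)))) (k : Int)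
    (pairs : List ((List (String × Int)) × (List (String × Int)))) (used : PySem.Set (Option Int))
    (hx : pvId x ∈ used) :
    pvLoopA (l1 ++ ys.map (fun y => (x, y)) ++ l2) k pairs used = pvLoopA (l1 ++ l2) k pairs used := by
  induction l1 generalizing pairs used with
  | nil => simpa using pvLoopA_skip x ys l2 k pairs used hx
  | cons c l1 ih =>
    obtain ⟨a, b⟩ := c
    by_cases hk : k ≤ (pairs.length : Int)
    · simp [pvLoopA, hk]
    · by_cases hs : pvId a ∈ used ∨ pvId b ∈ used
      · simp only [pvLoopA, List.cons_append]
        simp only [hk, if_false]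
        rw [if_pos (by simpa using hs), if_pos (by simpa using hs)]
        exact ih _ _ hx
      · simp only [pvLoopA, List.cons_append]
        simp only [hk, if_false]
        rw [if_neg (by simpa using hs), if_neg (by simpa using hs)]
        exact ih _ _ (pvSet_mem_add_left _ _ _ (pvSet_mem_add_left _ _ _ hx))

-- the combinations A still has to look at, given B's buffer state
def pvCombosBuf (buf : Option (List (String × Int))) (l : List (List (String × Int))) :
    List ((List (String × Int)) × (List (String × Int))) :=
  match buf with
  | none => pvCombos l
  | some b => l.map (fun y => (b, y)) ++ pvCombos l

theorem pvLoop_main (l : List (List (String × Int))) (k : Int) :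
    ∀ (buf : Option (List (String × Int)))
      (pairs : List ((List (String × Int)) × (List (String × Int)))) (used : PySem.Set (Option Int)),
      (∀ b, buf = some b → pvId b ∉ used) →
      pvLoopA (pvCombosBuf buf l) k pairs used = pvLoopB l k pairs used buf := by
  induction l with
  | nil => intro buf pairs used _; cases buf <;> simp [pvCombosBuf, pvCombos, pvLoopA, pvLoopB]
  | cons x rest ih =>
    intro buf pairs used hbuf
    by_cases hk : k ≤ (pairs.length : Int)
    · have h1 : pvLoopB (x :: rest) k pairs used buf = pairs := by simp [pvLoopB, hk]
      rw [h1, pvLoopA_ge _ _ _ _ hk]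
    · cases buf with
      | none =>
        by_cases hx : pvId x ∈ used
        · have h1 : pvCombosBuf none (x :: rest) = rest.map (fun y => (x, y)) ++ pvCombos rest := rfl
          rw [h1, pvLoopA_skip _ _ _ _ _ _ hx]
          have h2 := ih none pairs used (by intro b h; cases h)
          simp only [pvCombosBuf] at h2
          rw [h2]
          simp [pvLoopB, hk, hx]
        · have h1 : pvCombosBuf none (x :: rest) = pvCombosBuf (some x) rest := rfl
          rw [h1, ih (some x) pairs used (by intro b h; cases h; simpa using hx)]
          simp [pvLoopB, hk, hx]
      | some b =>
        have hb : pvId b ∉ used := hbuf b rfl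
        have h1 : pvCombosBuf (some b) (x :: rest) =
            (b, x) :: (rest.map (fun y => (b, y)) ++ rest.map (fun y => (x, y)) ++ pvCombos rest) := by
          simp [pvCombosBuf, pvCombos]
        rw [h1]
        by_cases hx : pvId x ∈ used
        · -- x is skipped: the pair (b, x) and the whole (x, ·) block disappear
          simp only [pvLoopA]
          simp only [hk, if_false]
          rw [if_pos (by simpa using Or.inr hx)]
          rw [pvLoopA_del _ _ _ _ _ _ _ hx]
          have h2 := ih (some b) pairs used (by intro b' h'; cases h'; exact hb)
          simp only [pvCombosBuf] at h2
          rw [h2]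
          simp [pvLoopB, hk, hx]
        · -- pair (b, x) is taken
          simp only [pvLoopA]
          simp only [hk, if_false]
          rw [if_neg (by simpa using not_or.mpr ⟨hb, hx⟩)]
          rw [pvLoopA_del _ _ _ _ _ _ _ (pvSet_mem_add_self _ _)]
          rw [pvLoopA_skip _ _ _ _ _ _ (pvSet_mem_add_left _ _ _ (pvSet_mem_add_self _ _))]
          have h2 := ih none (pairs ++ [(b, x)]) ((used.add (pvId b)).add (pvId x))
            (by intro b' h'; cases h')
          simp only [pvCombosBuf] at h2
          rw [h2]
          simp [pvLoopB, hk, hx]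

-- ===== VERDICT (by name: the statement is the Claim_ definition above) =====
theorem pick_pairs_spec : Claim_equal_pick_pairs := by
  intro ranked k _
  unfold Spec_pick_pairs pick_pairs pick_pairs_alt
  exact pvLoop_main ranked k none [] PySem.Set.empty (by intro b h; cases h)
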